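-- pv_equiv track=rewrite | github.com/TMazenge/Color-Plosion-Project | Color Plosion/board.py | y_match_made
-- ===== SOURCE A (Python) =====
-- def y_match_made(grid):
-- 	"""Checks to see if match of 3 adjacent numbers in the same
-- 	   row has been made.
--
-- 	Args:
-- 		grid: New created grid.
--
-- 	Returns:
-- 		A boolean value whether a match had been made in the row.
-- 	"""
-- 	for row in range(len(grid) - 2):
-- 		for col in range(len(grid[row])):
-- 			# Accesses three adjacent numbers in the same column.
-- 			y_row1 = grid[row][col]
-- 			y_row2 = grid[row + 1][col]
-- 			y_row3 = grid[row + 2][col]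
-- 			# Returns True if the numbers match.
-- 			if (y_row1 == y_row2) and (y_row2 == y_row3):
-- 				return True
-- 	return False
-- ===== SOURCE B (Python) =====
-- def y_match_made(grid):
--     """Column-wise streak scan: walk each column downwards keeping a run
--     counter; report a match as soon as a run of equal values reaches 3."""
--     if len(grid) < 3:
--         return False
--     for col in range(len(grid[0])):
--         prev = grid[0][col]
--         streak = 1
--         for row in grid[1:]:
--             v = row[col]
--             if v == prev:
--                 streak += 1
--                 if streak >= 3:
--                     return True
--             else:
--                 streak = 1
--             prev = v
--     return False
-- ===== Notes on version B (the rewrite author's own statement) =====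
-- stated objective: alternative
-- what changed: Replaces the fixed-offset triple test at every (row,col) with a column-by-column downward scan that keeps a consecutive-run counter and reports a match as soon as a streak reaches 3.
-- outside the precondition, e.g. on y_match_made([[1], [2, 5], [3, 5], [4, 5]]): A returns True, B returns False
import Mathlib
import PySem

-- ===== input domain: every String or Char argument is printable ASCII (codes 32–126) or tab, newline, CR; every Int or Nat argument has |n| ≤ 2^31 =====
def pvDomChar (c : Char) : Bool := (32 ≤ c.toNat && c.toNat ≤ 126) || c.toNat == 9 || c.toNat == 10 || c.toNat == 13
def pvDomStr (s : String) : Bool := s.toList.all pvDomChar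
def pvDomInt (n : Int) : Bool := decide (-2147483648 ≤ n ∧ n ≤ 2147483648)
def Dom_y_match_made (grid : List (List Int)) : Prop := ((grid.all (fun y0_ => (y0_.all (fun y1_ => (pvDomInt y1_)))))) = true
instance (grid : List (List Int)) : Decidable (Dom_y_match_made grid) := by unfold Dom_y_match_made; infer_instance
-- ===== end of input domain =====

-- B replaces the per-position fixed-offset triple test by a column-wise streak scan (alternative decomposition, same cost).


-- ===== PORT A =====
def y_match_made (grid : List (List Int)) : Bool :=
  (PySem.List.pyRange 0 ((grid.length : Int) - 2) 1).any fun row =>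
    (PySem.List.pyRange 0 (((PySem.List.pyGetD grid row []).length : Int)) 1).any fun col =>
      let y1 := PySem.List.pyGetD (PySem.List.pyGetD grid row []) col 0
      let y2 := PySem.List.pyGetD (PySem.List.pyGetD grid (row + 1) []) col 0
      let y3 := PySem.List.pyGetD (PySem.List.pyGetD grid (row + 2) []) col 0
      (y1 == y2) && (y2 == y3)

-- ===== PORT B =====
-- inner loop of Source B: walk down one column keeping (prev, streak)
def yColScan (rows : List (List Int)) (col : Int) (prev : Int) (streak : Nat) : Bool :=
  match rows with
  | [] => false
  | r :: rest =>
    let v := PySem.List.pyGetD r col 0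
    if v == prev then
      if streak + 1 ≥ 3 then true
      else yColScan rest col v (streak + 1)
    else yColScan rest col v 1

def y_match_made_alt (grid : List (List Int)) : Bool :=
  if grid.length < 3 then false
  else
    match grid with
    | [] => false
    | g0 :: rest =>
      (PySem.List.pyRange 0 ((g0.length : Int)) 1).any fun col =>
        yColScan rest col (PySem.List.pyGetD g0 col 0) 1

-- ===== PRECONDITION & SPEC =====
-- Pre_ excludes ragged grids with 3 or more rows: there A's row-major fixed-offset indexing
-- either raises IndexError or returns a scan-order accident that a column scan cannot share.
def Pre_y_match_made (grid : List (List Int)) : Prop :=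
  grid.length < 3 ∨ ∀ r ∈ grid, r.length = (grid.headD []).length
instance (grid : List (List Int)) : Decidable (Pre_y_match_made grid) := by
  unfold Pre_y_match_made; infer_instance

def pvWitness_y_match_made : List (List Int) := [[1, 2], [1, 3], [2, 3]]

def Spec_y_match_made (grid : List (List Int)) (out : Bool) : Prop := out = y_match_made_alt grid
instance (grid : List (List Int)) (out : Bool) : Decidable (Spec_y_match_made grid out) := by
  unfold Spec_y_match_made; infer_instance

-- ===== CLAIM (what is proved, stated in full; the proofs are below) =====
def Claim_equal_y_match_made : Prop := ∀ (grid : List (List Int)), Dom_y_match_made grid → Pre_y_match_made grid → Spec_y_match_made grid (y_match_made grid)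

-- ===== LEMMAS AND PROOFS =====

-- common characterisation: some column has three vertically adjacent equal values
def tripleIn (grid : List (List Int)) : Prop :=
  ∃ i c : Nat, i + 3 ≤ grid.length ∧ c < (grid.getD i []).length ∧
    (grid.getD i []).getD c 0 = (grid.getD (i + 1) []).getD c 0 ∧
    (grid.getD (i + 1) []).getD c 0 = (grid.getD (i + 2) []).getD c 0

-- pure version of the column streak test
def hasTriple : List Int → Bool
  | a :: b :: c :: t => ((a == b) && (b == c)) || hasTriple (b :: c :: t)
  | _ => false

lemma hasTriple_short (cs : List Int) (h : cs.length ≤ 2) : hasTriple cs = false := by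
  match cs, h with
  | [], _ => rfl
  | [_], _ => rfl
  | [_, _], _ => rfl

lemma hasTriple_cons3 (a b c : Int) (t : List Int) :
    hasTriple (a :: b :: c :: t) = (((a == b) && (b == c)) || hasTriple (b :: c :: t)) := rfl

lemma hasTriple_ne (a b : Int) (t : List Int) (h : a ≠ b) :
    hasTriple (a :: b :: t) = hasTriple (b :: t) := by
  cases t with
  | nil => rfl
  | cons c t' => rw [hasTriple_cons3]; simp [beq_eq_false_iff_ne.mpr h]

lemma hasTriple_dup3 (p : Int) (t : List Int) : hasTriple (p :: p :: p :: t) = true := by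
  rw [hasTriple_cons3]; simp

lemma hasTriple_third_ne (p v : Int) (t : List Int) (h : p ≠ v) :
    hasTriple (p :: p :: v :: t) = hasTriple (p :: v :: t) := by
  rw [hasTriple_cons3]; simp [beq_eq_false_iff_ne.mpr h]

lemma any_pyRange_nat_iff (m : Nat) (f : Int → Bool) :
    ((PySem.List.pyRange 0 (m : Int) 1).any f = true) ↔ ∃ k : Nat, k < m ∧ f (k : Int) = true := by
  rw [List.any_eq_true]
  constructor
  · rintro ⟨x, hx, hf⟩
    rw [PySem.List.mem_pyRange_one] at hx
    refine ⟨x.toNat, by omega, ?_⟩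
    rwa [Int.toNat_of_nonneg hx.1]
  · rintro ⟨k, hk, hf⟩
    exact ⟨(k : Int), by rw [PySem.List.mem_pyRange_one]; omega, hf⟩

lemma any_pyRange_sub2_iff (n : Nat) (f : Int → Bool) :
    ((PySem.List.pyRange 0 ((n : Int) - 2) 1).any f = true) ↔ ∃ k : Nat, k + 3 ≤ n ∧ f (k : Int) = true := by
  rw [List.any_eq_true]
  constructor
  · rintro ⟨x, hx, hf⟩
    rw [PySem.List.mem_pyRange_one] at hx
    refine ⟨x.toNat, by omega, ?_⟩
    rwa [Int.toNat_of_nonneg hx.1]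
  · rintro ⟨k, hk, hf⟩
    exact ⟨(k : Int), by rw [PySem.List.mem_pyRange_one]; omega, hf⟩

lemma getD_map_col (rows : List (List Int)) (c i : Nat) :
    (rows.map (fun r => r.getD c 0)).getD i 0 = (rows.getD i []).getD c 0 := by
  induction rows generalizing i with
  | nil => simp
  | cons r rest ih => cases i with
    | zero => simp
    | succ j => simpa using ih j

lemma hasTriple_iff (cs : List Int) :
    hasTriple cs = true ↔ ∃ i : Nat, i + 3 ≤ cs.length ∧
      cs.getD i 0 = cs.getD (i + 1) 0 ∧ cs.getD (i + 1) 0 = cs.getD (i + 2) 0 := by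
  induction cs with
  | nil =>
    rw [hasTriple_short [] (by simp)]
    simp
  | cons a rest ih =>
    match rest with
    | [] =>
      rw [hasTriple_short [a] (by simp)]
      simp
    | [b] =>
      rw [hasTriple_short [a, b] (by simp)]
      constructor
      · intro h; exact absurd h (by simp)
      · rintro ⟨i, hi, _⟩; simp at hi
    | b :: c :: t =>
      rw [hasTriple_cons3]
      simp only [Bool.or_eq_true, Bool.and_eq_true, beq_iff_eq, ih]
      constructor
      · rintro (⟨h1, h2⟩ | ⟨i, hi, h1, h2⟩)
        · exact ⟨0, by simp, by simpa using h1, by simpa using h2⟩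
        · exact ⟨i + 1, by simp at hi ⊢; omega, by simpa using h1, by simpa using h2⟩
      · rintro ⟨i, hi, h1, h2⟩
        cases i with
        | zero => exact Or.inl ⟨by simpa using h1, by simpa using h2⟩
        | succ j =>
          exact Or.inr ⟨j, by simp at hi ⊢; omega, by simpa using h1, by simpa using h2⟩

-- the streak scan computes hasTriple of the column (streak 1) / with a duplicated head (streak 2)
lemma yColScan_eq (rows : List (List Int)) (c : Nat) (p : Int) :
    yColScan rows (c : Int) p 1 = hasTriple (p :: rows.map (fun r => r.getD c 0)) ∧
    yColScan rows (c : Int) p 2 = hasTriple (p :: p :: rows.map (fun r => r.getD c 0)) := by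
  induction rows generalizing p with
  | nil =>
    exact ⟨(hasTriple_short [p] (by simp)).symm, (hasTriple_short [p, p] (by simp)).symm⟩
  | cons r rest ih =>
    have hv : PySem.List.pyGetD r (c : Int) 0 = r.getD c 0 := PySem.List.pyGetD_natCast r c 0
    have hmap : (r :: rest).map (fun r => r.getD c 0) = r.getD c 0 :: rest.map (fun r => r.getD c 0) :=
      List.map_cons ..
    constructor
    · show (if (PySem.List.pyGetD r (c : Int) 0) == p then
             if (1 : Nat) + 1 ≥ 3 then true else yColScan rest (c : Int) (PySem.List.pyGetD r (c : Int) 0) 2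
           else yColScan rest (c : Int) (PySem.List.pyGetD r (c : Int) 0) 1) = _
      rw [hv, hmap]
      by_cases h : r.getD c 0 = p
      · rw [h]
        simp only [beq_self_eq_true, if_true, show ¬((1 : Nat) + 1 ≥ 3) by omega, if_false]
        exact (ih p).2
      · rw [beq_eq_false_iff_ne.mpr h, if_neg (by decide)]
        rw [(ih (r.getD c 0)).1, hasTriple_ne p (r.getD c 0) _ (fun he => h he.symm)]
    · show (if (PySem.List.pyGetD r (c : Int) 0) == p then
             if (2 : Nat) + 1 ≥ 3 then true else yColScan rest (c : Int) (PySem.List.pyGetD r (c : Int) 0) 3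
           else yColScan rest (c : Int) (PySem.List.pyGetD r (c : Int) 0) 1) = _
      rw [hv, hmap]
      by_cases h : r.getD c 0 = p
      · rw [h]
        simp only [beq_self_eq_true, if_true, show ((2 : Nat) + 1 ≥ 3) by omega, if_true]
        exact (hasTriple_dup3 p _).symm
      · rw [beq_eq_false_iff_ne.mpr h, if_neg (by decide)]
        rw [(ih (r.getD c 0)).1,
            hasTriple_third_ne p (r.getD c 0) _ (fun he => h he.symm),
            hasTriple_ne p (r.getD c 0) _ (fun he => h he.symm)]

lemma y_match_made_iff (grid : List (List Int)) :
    y_match_made grid = true ↔ tripleIn grid := by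
  unfold y_match_made tripleIn
  rw [any_pyRange_sub2_iff]
  constructor
  · rintro ⟨i, hi, hf⟩
    rw [PySem.List.pyGetD_natCast] at hf
    rw [any_pyRange_nat_iff] at hf
    obtain ⟨c, hc, hf⟩ := hf
    simp only [PySem.List.pyGetD_natCast] at hf
    have h1 : (i : Int) + 1 = ((i + 1 : Nat) : Int) := by push_cast; ring
    have h2 : (i : Int) + 2 = ((i + 2 : Nat) : Int) := by push_cast; ring
    rw [h1, h2, PySem.List.pyGetD_natCast, PySem.List.pyGetD_natCast] at hf
    simp only [Bool.and_eq_true, beq_iff_eq] at hf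
    exact ⟨i, c, hi, hc, hf.1, hf.2⟩
  · rintro ⟨i, c, hi, hc, h1, h2⟩
    refine ⟨i, hi, ?_⟩
    rw [PySem.List.pyGetD_natCast, any_pyRange_nat_iff]
    refine ⟨c, hc, ?_⟩
    have e1 : (i : Int) + 1 = ((i + 1 : Nat) : Int) := by push_cast; ring
    have e2 : (i : Int) + 2 = ((i + 2 : Nat) : Int) := by push_cast; ring
    simp only [e1, e2, PySem.List.pyGetD_natCast, Bool.and_eq_true, beq_iff_eq]
    exact ⟨h1, h2⟩

lemma y_match_made_alt_iff (grid : List (List Int)) (h3 : 3 ≤ grid.length)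
    (hrect : ∀ r ∈ grid, r.length = (grid.headD []).length) :
    y_match_made_alt grid = true ↔ tripleIn grid := by
  match grid, h3 with
  | g0 :: rest, h3 =>
    unfold y_match_made_alt
    rw [if_neg (by simp at h3 ⊢; omega)]
    rw [any_pyRange_nat_iff]
    have hcol : ∀ c : Nat, yColScan rest (c : Int) (PySem.List.pyGetD g0 (c : Int) 0) 1
        = hasTriple ((g0 :: rest).map (fun r => r.getD c 0)) := by
      intro c
      rw [PySem.List.pyGetD_natCast, List.map_cons]
      exact (yColScan_eq rest c (g0.getD c 0)).1
    constructor
    · rintro ⟨c, hc, hf⟩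
      rw [hcol c, hasTriple_iff] at hf
      obtain ⟨i, hi, h1, h2⟩ := hf
      simp only [getD_map_col] at h1 h2
      simp only [List.length_map] at hi
      refine ⟨i, c, hi, ?_, h1, h2⟩
      have hlen : i < (g0 :: rest).length := by simp at hi ⊢; omega
      have hmem : (g0 :: rest).getD i [] ∈ g0 :: rest := by
        rw [List.getD_eq_getElem _ _ hlen]; exact List.getElem_mem hlen
      have hw := hrect _ hmem
      simp only [List.headD_cons] at hw
      rw [hw]; simpa using hc
    · rintro ⟨i, c, hi, hc, h1, h2⟩
      have hlen : i < (g0 :: rest).length := by simp at hi ⊢; omega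
      have hmem : (g0 :: rest).getD i [] ∈ g0 :: rest := by
        rw [List.getD_eq_getElem _ _ hlen]; exact List.getElem_mem hlen
      have hc' : c < g0.length := by
        have hw := hrect _ hmem
        simp only [List.headD_cons] at hw
        omega
      refine ⟨c, hc', ?_⟩
      rw [hcol c, hasTriple_iff]
      refine ⟨i, by simpa using hi, ?_, ?_⟩
      · rw [getD_map_col, getD_map_col]; exact h1
      · rw [getD_map_col, getD_map_col]; exact h2

-- ===== VERDICT (by name: the statement is the Claim_ definition above) =====
theorem y_match_made_spec : Claim_equal_y_match_made := by
  intro grid _ hpre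
  unfold Spec_y_match_made
  rcases hpre with hlt | hrect
  · have hA : y_match_made grid = false := by
      unfold y_match_made
      rw [PySem.List.pyRange_one_eq_nil (by omega : ((grid.length : Int) - 2) ≤ 0)]
      rfl
    have hB : y_match_made_alt grid = false := by
      unfold y_match_made_alt
      rw [if_pos hlt]
    rw [hA, hB]
  · by_cases h3 : 3 ≤ grid.length
    · exact Bool.eq_iff_iff.mpr
        ((y_match_made_iff grid).trans (y_match_made_alt_iff grid h3 hrect).symm)
    · have hA : y_match_made grid = false := by
        unfold y_match_made
        rw [PySem.List.pyRange_one_eq_nil (by omega : ((grid.length : Int) - 2) ≤ 0)]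
        rfl
      have hB : y_match_made_alt grid = false := by
        unfold y_match_made_alt
        rw [if_pos (by omega)]
      rw [hA, hB]
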